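-- pv_equiv track=rewrite | github.com/msaunders804/Fantasy-Football-Automation | utils/data_utils.py | parse_projection_file_headers
-- ===== SOURCE A (Python) =====
-- from typing import Dict, List, Optional, Any
--
-- def parse_projection_file_headers(headers: List[str]) -> Dict[str, str]:
--     """Parse and map projection file headers to standard format"""
--     header_mapping = {}
--
--     # Common header variations
--     mapping_rules = {
--         'name': ['name', 'player', 'player_name', 'full_name'],
--         'position': ['pos', 'position'],
--         'team': ['tm', 'team'],
--         'points': ['fpts', 'fantasy_points', 'projected_points', 'points'],
--         'pass_yds': ['pass_yds', 'passing_yards', 'py'],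
--         'pass_tds': ['pass_tds', 'passing_tds', 'ptd'],
--         'rush_yds': ['rush_yds', 'rushing_yards', 'ry'],
--         'rush_tds': ['rush_tds', 'rushing_tds', 'rtd'],
--         'receptions': ['rec', 'receptions', 'catches'],
--         'rec_yds': ['rec_yds', 'receiving_yards', 'rec_yards'],
--         'rec_tds': ['rec_tds', 'receiving_tds', 'rec_td']
--     }
--
--     for standard_name, variations in mapping_rules.items():
--         for header in headers:
--             header_lower = header.lower().strip()
--             if header_lower in variations:
--                 header_mapping[header] = standard_name
--                 break
--
--     return header_mapping
-- ===== SOURCE B (Python) =====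
-- from typing import Dict, List
--
-- def parse_projection_file_headers(headers: List[str]) -> Dict[str, str]:
--     """Parse and map projection file headers to standard format"""
--     mapping_rules = {
--         'name': ['name', 'player', 'player_name', 'full_name'],
--         'position': ['pos', 'position'],
--         'team': ['tm', 'team'],
--         'points': ['fpts', 'fantasy_points', 'projected_points', 'points'],
--         'pass_yds': ['pass_yds', 'passing_yards', 'py'],
--         'pass_tds': ['pass_tds', 'passing_tds', 'ptd'],
--         'rush_yds': ['rush_yds', 'rushing_yards', 'ry'],
--         'rush_tds': ['rush_tds', 'rushing_tds', 'rtd'],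
--         'receptions': ['rec', 'receptions', 'catches'],
--         'rec_yds': ['rec_yds', 'receiving_yards', 'rec_yards'],
--         'rec_tds': ['rec_tds', 'receiving_tds', 'rec_td']
--     }
--
--     # Flatten the rules into a single variation -> standard lookup table.
--     variation_to_standard = {}
--     for standard, variations in mapping_rules.items():
--         for variation in variations:
--             variation_to_standard[variation] = standard
--
--     # One pass over the headers: remember the first header seen per standard.
--     standard_to_header = {}
--     for header in headers:
--         standard = variation_to_standard.get(header.lower().strip())
--         if standard is not None and standard not in standard_to_header:
--             standard_to_header[standard] = header
--
--     # Emit in standard (rule) order, keyed by the matched header.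
--     header_mapping = {}
--     for standard in mapping_rules:
--         if standard in standard_to_header:
--             header_mapping[standard_to_header[standard]] = standard
--     return header_mapping
-- ===== Notes on version B (the rewrite author's own statement) =====
-- stated objective: faster
-- what changed: B flattens mapping_rules into one variation-to-standard dict and makes a single pass over headers recording the first header per standard, then emits in rule order, instead of A's rescan of the whole header list once per standard.
import Mathlib
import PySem

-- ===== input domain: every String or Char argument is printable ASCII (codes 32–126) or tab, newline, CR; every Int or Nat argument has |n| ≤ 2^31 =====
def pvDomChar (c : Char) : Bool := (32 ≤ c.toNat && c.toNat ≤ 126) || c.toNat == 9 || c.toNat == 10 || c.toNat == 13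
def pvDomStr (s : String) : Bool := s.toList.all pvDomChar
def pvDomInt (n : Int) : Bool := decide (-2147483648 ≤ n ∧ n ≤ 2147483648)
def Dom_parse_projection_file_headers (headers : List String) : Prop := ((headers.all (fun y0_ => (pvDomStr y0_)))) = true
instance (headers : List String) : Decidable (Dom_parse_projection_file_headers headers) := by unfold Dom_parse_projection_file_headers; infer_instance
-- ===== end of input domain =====

-- B flattens the mapping rules into one variation→standard dict and makes a single pass
-- over the headers instead of rescanning them once per standard (same return value).


-- the literal mapping_rules dict both Pythons contain (insertion order preserved)
def pvRules : List (String × List String) :=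
  [("name", ["name", "player", "player_name", "full_name"]),
   ("position", ["pos", "position"]),
   ("team", ["tm", "team"]),
   ("points", ["fpts", "fantasy_points", "projected_points", "points"]),
   ("pass_yds", ["pass_yds", "passing_yards", "py"]),
   ("pass_tds", ["pass_tds", "passing_tds", "ptd"]),
   ("rush_yds", ["rush_yds", "rushing_yards", "ry"]),
   ("rush_tds", ["rush_tds", "rushing_tds", "rtd"]),
   ("receptions", ["rec", "receptions", "catches"]),
   ("rec_yds", ["rec_yds", "receiving_yards", "rec_yards"]),
   ("rec_tds", ["rec_tds", "receiving_tds", "rec_td"])]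

-- ===== PORT A =====
-- inner 'for header in headers: … break' loop of A
def pvALoop (headers : List String) (standard : String) (variations : List String)
    (hm : PySem.Dict String String) : PySem.Dict String String :=
  match headers with
  | [] => hm
  | header :: rest =>
      if PySem.Str.strip (PySem.Str.lower header) ∈ variations then
        hm.insert header standard
      else
        pvALoop rest standard variations hm

def parse_projection_file_headers (headers : List String) : List (String × String) :=
  (pvRules.foldl (fun hm r => pvALoop headers r.1 r.2 hm) PySem.Dict.empty).items

-- ===== PORT B =====
def parse_projection_file_headers_alt (headers : List String) : List (String × String) :=
  let variation_to_standard : PySem.Dict String String :=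
    pvRules.foldl (fun d r => r.2.foldl (fun d v => d.insert v r.1) d) PySem.Dict.empty
  let standard_to_header : PySem.Dict String String :=
    headers.foldl (fun d header =>
      match variation_to_standard.get? (PySem.Str.strip (PySem.Str.lower header)) with
      | some standard => if d.contains standard then d else d.insert standard header
      | none => d) PySem.Dict.empty
  (pvRules.foldl (fun res r =>
      match standard_to_header.get? r.1 with
      | some header => res.insert header r.1
      | none => res) PySem.Dict.empty).items

-- ===== PRECONDITION & SPEC =====
def Spec_parse_projection_file_headers (headers : List String) (out : List (String × String)) : Prop := out = parse_projection_file_headers_alt headers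
instance (headers : List String) (out : List (String × String)) : Decidable (Spec_parse_projection_file_headers headers out) := by unfold Spec_parse_projection_file_headers; infer_instance

-- ===== CLAIM (what is proved, stated in full; the proofs are below) =====
def Claim_equal_parse_projection_file_headers : Prop := ∀ (headers : List String), Dom_parse_projection_file_headers headers → Spec_parse_projection_file_headers headers (parse_projection_file_headers headers)

-- ===== LEMMAS AND PROOFS =====

-- the flattened variation→standard table, as a literal association list
def pvV2S : PySem.Dict String String :=
  pvRules.foldl (fun d r => r.2.foldl (fun d v => d.insert v r.1) d) PySem.Dict.empty

def pvNorm (h : String) : String := PySem.Str.strip (PySem.Str.lower h)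

-- A's inner loop is exactly 'first header whose normalisation is in variations'
theorem pvALoop_eq (headers : List String) (s : String) (vs : List String)
    (hm : PySem.Dict String String) :
    pvALoop headers s vs hm =
      match headers.find? (fun h => decide (pvNorm h ∈ vs)) with
      | some h => hm.insert h s
      | none => hm := by
  induction headers with
  | nil => rfl
  | cons h t ih =>
      simp only [pvNorm] at ih ⊢
      by_cases hmem : PySem.Str.strip (PySem.Str.lower h) ∈ vs
      · simp [pvALoop, List.find?, hmem]
      · simp [pvALoop, List.find?, hmem, ih]

-- pointwise: looking a normalised header up in the flat table equals membership in r.2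
set_option maxRecDepth 4000 in
theorem pvV2S_items : pvV2S.items =
  [("name", "name"),
   ("player", "name"),
   ("player_name", "name"),
   ("full_name", "name"),
   ("pos", "position"),
   ("position", "position"),
   ("tm", "team"),
   ("team", "team"),
   ("fpts", "points"),
   ("fantasy_points", "points"),
   ("projected_points", "points"),
   ("points", "points"),
   ("pass_yds", "pass_yds"),
   ("passing_yards", "pass_yds"),
   ("py", "pass_yds"),
   ("pass_tds", "pass_tds"),
   ("passing_tds", "pass_tds"),
   ("ptd", "pass_tds"),
   ("rush_yds", "rush_yds"),
   ("rushing_yards", "rush_yds"),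
   ("ry", "rush_yds"),
   ("rush_tds", "rush_tds"),
   ("rushing_tds", "rush_tds"),
   ("rtd", "rush_tds"),
   ("rec", "receptions"),
   ("receptions", "receptions"),
   ("catches", "receptions"),
   ("rec_yds", "rec_yds"),
   ("receiving_yards", "rec_yds"),
   ("rec_yards", "rec_yds"),
   ("rec_tds", "rec_tds"),
   ("receiving_tds", "rec_tds"),
   ("rec_td", "rec_tds")] := by decide

set_option maxRecDepth 4000 in
theorem pvV2S_nodup : pvV2S.keys.Nodup := by decide

theorem pvV2S_pred (r : String × List String) (hr : r ∈ pvRules) (x : String) :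
    (pvV2S.get? x == some r.1) = decide (x ∈ r.2) := by
  have hiff : pvV2S.get? x = some r.1 ↔ x ∈ r.2 := by
    rw [PySem.Dict.get?_eq_some_iff_mem_items _ _ _ pvV2S_nodup, pvV2S_items]
    fin_cases hr <;> simp
  have hbool : (pvV2S.get? x == some r.1) = decide (pvV2S.get? x = some r.1) := by
    by_cases h : pvV2S.get? x = some r.1 <;> simp [h]
  rw [hbool, decide_eq_decide]
  exact hiff

-- the one-pass loop of B computes, per standard, the first matching header
theorem pvS2H_get (headers : List String) (d : PySem.Dict String String) (s : String) :
    (headers.foldl (fun d header =>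
        match pvV2S.get? (PySem.Str.strip (PySem.Str.lower header)) with
        | some standard => if d.contains standard then d else d.insert standard header
        | none => d) d).get? s =
      ((d.get? s).orElse (fun _ => headers.find? (fun h => pvV2S.get? (PySem.Str.strip (PySem.Str.lower h)) == some s))) := by
  induction headers generalizing d with
  | nil => cases hd : d.get? s <;> simp [Option.orElse, hd]
  | cons h t ih =>
      simp only [List.foldl_cons, List.find?]
      cases hv : pvV2S.get? (PySem.Str.strip (PySem.Str.lower h)) with
      | none =>
          rw [ih]
          simp
      | some s0 =>
          show (List.foldl _ (if d.contains s0 = true then d else d.insert s0 h) t).get? s = _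
          by_cases hs : s0 = s
          · subst hs
            by_cases hc : d.contains s0 = true
            · have hsome : (d.get? s0).isSome := by
                rw [← PySem.Dict.contains_eq_isSome_get?]; exact hc
              obtain ⟨v, hd⟩ := Option.isSome_iff_exists.mp hsome
              rw [if_pos hc, ih]
              simp [Option.orElse, hd]
            · have hd : d.get? s0 = none := by
                rw [PySem.Dict.get?_eq_none_iff_contains]
                exact Bool.not_eq_true _ ▸ (by simpa using hc)
              rw [if_neg hc, ih]
              simp [Option.orElse, hd, PySem.Dict.get?_insert_self]
          · have hp : (some s0 == some s) = false := by simp [hs]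
            rw [hp]
            by_cases hc : d.contains s0 = true
            · rw [if_pos hc, ih]
            · rw [if_neg hc, ih, PySem.Dict.get?_insert_of_ne _ _ (fun e => hs e.symm)]

theorem parse_projection_file_headers_spec : Claim_equal_parse_projection_file_headers := by
  intro headers _
  show parse_projection_file_headers headers = parse_projection_file_headers_alt headers
  unfold parse_projection_file_headers parse_projection_file_headers_alt
  congr 1
  have hA : (fun (hm : PySem.Dict String String) (r : String × List String) =>
      pvALoop headers r.1 r.2 hm) = (fun hm r =>
        match headers.find? (fun h => decide (PySem.Str.strip (PySem.Str.lower h) ∈ r.2)) with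
        | some h => hm.insert h r.1
        | none => hm) := by
    funext hm r
    simpa [pvNorm] using pvALoop_eq headers r.1 r.2 hm
  rw [hA]
  refine (PySem.List.foldl_congr_mem _ _ _ _ ?_).symm
  intro acc r hr
  rw [show (pvRules.foldl (fun d r => r.2.foldl (fun d v => d.insert v r.1) d)
        PySem.Dict.empty) = pvV2S from rfl]
  rw [pvS2H_get headers PySem.Dict.empty r.1]
  have hpred : (fun h => pvV2S.get? (PySem.Str.strip (PySem.Str.lower h)) == some r.1) =
      (fun h => decide (PySem.Str.strip (PySem.Str.lower h) ∈ r.2)) := by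
    funext h
    exact pvV2S_pred r hr (PySem.Str.strip (PySem.Str.lower h))
  simp [PySem.Dict.get?_empty, Option.orElse, hpred]
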